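-- pv_equiv track=rewrite | github.com/czheo/advent-of-code | 2024/day17/p2.py | find
-- ===== SOURCE A (Python) =====
-- prog = [2, 4, 1, 1, 7, 5, 0, 3, 1, 4, 4, 0, 5, 5, 3, 0]
--
-- def find(i, A):
--     if i < 0:
--         return A
--     for A in range(A * 8, (A + 1) * 8):
--         B = (A % 8) ^ 5 ^ (A // (2 ** ((A % 8) ^ 1)))
--         if prog[i] == B % 8:
--             a = find(i - 1, A)
--             if a >= 0:
--                 return a
--     return -1
-- ===== SOURCE B (Python) =====
-- prog = [2, 4, 1, 1, 7, 5, 0, 3, 1, 4, 4, 0, 5, 5, 3, 0]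
--
-- def find(i, A):
--     # Layered breadth-first expansion: keep every surviving prefix per level,
--     # then return the smallest valid (nonnegative) final value, -1 on failure.
--     if i < 0:
--         return A
--     cands = [A]
--     for level in range(i, -1, -1):
--         cands = [A2 for p in cands for A2 in range(p * 8, (p + 1) * 8)
--                  if prog[level] == (((A2 % 8) ^ 5 ^ (A2 // (2 ** ((A2 % 8) ^ 1)))) % 8)]
--     vals = [v for v in cands if v >= 0]
--     return min(vals) if vals else -1
-- ===== Notes on version B (the rewrite author's own statement) =====
-- stated objective: alternative
-- what changed: Replaces the recursive depth-first search with backtracking and first-hit early return by an iterative level-by-level expansion that keeps the whole set of surviving prefixes per level and finally returns the minimum nonnegative survivor (-1 if none).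
import Mathlib
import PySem

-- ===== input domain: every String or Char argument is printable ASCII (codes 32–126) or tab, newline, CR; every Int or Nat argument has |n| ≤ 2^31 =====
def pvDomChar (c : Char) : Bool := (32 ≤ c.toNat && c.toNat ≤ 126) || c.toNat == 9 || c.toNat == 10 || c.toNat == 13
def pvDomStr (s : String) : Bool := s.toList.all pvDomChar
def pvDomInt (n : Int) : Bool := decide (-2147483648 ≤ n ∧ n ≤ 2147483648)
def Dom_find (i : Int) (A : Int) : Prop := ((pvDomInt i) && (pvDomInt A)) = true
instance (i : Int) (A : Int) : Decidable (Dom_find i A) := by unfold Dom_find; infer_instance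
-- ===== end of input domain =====

-- B replaces A's depth-first search with backtracking by an iterative layered
-- candidate-set expansion that keeps all surviving prefixes and returns the
-- minimal valid result (objective: alternative algorithm, similar cost).

-- ===== PORT A =====
def prog : List Int := [2, 4, 1, 1, 7, 5, 0, 3, 1, 4, 4, 0, 5, 5, 3, 0]

-- B = (A % 8) ^ 5 ^ (A // (2 ** ((A % 8) ^ 1))), then taken % 8.
-- The exponent (A % 8) ^ 1 is always in [0,7], so `.toNat` on it is exact.
def bval (a2 : Int) : Int :=
  PySem.Int.mod
    (PySem.Int.bxor (PySem.Int.bxor (PySem.Int.mod a2 8) 5)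
      (PySem.Int.floordiv a2 ((2 : Int) ^ (PySem.Int.bxor (PySem.Int.mod a2 8) 1).toNat))) 8

-- prog[i] == B % 8 (i is in range under Pre_find; the getD default is unreachable there)
def okA (lvl : Int) (a2 : Int) : Bool := PySem.List.pyGetD prog lvl 0 == bval a2

-- the `for A in range(...)` loop with its early returns
def findGo (f : Int → Int) (c : Int → Bool) : List Int → Int
  | [] => -1
  | x :: xs =>
      if c x then
        let a := f x
        if 0 ≤ a then a else findGo f c xs
      else findGo f c xs

def find (i : Int) (A : Int) : Int :=
  if _h : i < 0 then A
  else findGo (fun a2 => find (i - 1) a2) (okA i) (PySem.List.pyRange (A * 8) ((A + 1) * 8) 1)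
termination_by (i + 1).toNat
decreasing_by omega

-- ===== PORT B =====
-- one comprehension step: all children of prefix p that survive level `lvl`
def expand (lvl : Int) (p : Int) : List Int :=
  (PySem.List.pyRange (p * 8) ((p + 1) * 8) 1).filter (okA lvl)

def find_alt (i : Int) (A : Int) : Int :=
  if i < 0 then A
  else
    let cands := (PySem.List.pyRange i (-1) (-1)).foldl
      (fun cs level => cs.flatMap (expand level)) [A]
    let vals := cands.filter (fun v => decide (0 ≤ v))
    match PySem.List.min? vals (fun x => x) with
    | some m => m
    | none => -1

-- ===== PRECONDITION & SPEC =====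
-- Pre_ excludes i ≥ 16, where Python's prog[i] raises IndexError.
def Pre_find (i : Int) (A : Int) : Prop := i < 16
instance (i : Int) (A : Int) : Decidable (Pre_find i A) := by unfold Pre_find; infer_instance
def pvWitness_find : Int × Int := (2, 0)

def Spec_find (i : Int) (A : Int) (out : Int) : Prop := out = find_alt i A
instance (i : Int) (A : Int) (out : Int) : Decidable (Spec_find i A out) := by unfold Spec_find; infer_instance

-- ===== CLAIM (what is proved, stated in full; the proofs are below) =====
def Claim_equal_find : Prop := ∀ (i : Int) (A : Int), Dom_find i A → Pre_find i A → Spec_find i A (find i A)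

-- ===== LEMMAS AND PROOFS =====

-- the full candidate tree below prefix p, from level i down to 0
def S (i : Int) (p : Int) : List Int :=
  if _h : i < 0 then [p] else (expand i p).flatMap (fun q => S (i - 1) q)
termination_by (i + 1).toNat
decreasing_by omega

-- normalize: what the caller of a recursive `find` observes through the `a >= 0` check
def pyN (v : Int) : Int := if 0 ≤ v then v else -1

-- min-of-nonnegative-survivors, the tail of find_alt
def Mv (l : List Int) : Int :=
  match PySem.List.min? (l.filter (fun v => decide (0 ≤ v))) (fun x => x) with
  | some m => m
  | none => -1

theorem S_neg {i : Int} (h : i < 0) (p : Int) : S i p = [p] := by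
  rw [S]; simp [h]

theorem S_nonneg {i : Int} (h : ¬ i < 0) (p : Int) :
    S i p = (expand i p).flatMap (fun q => S (i - 1) q) := by
  rw [S]; simp [h]

-- every value in the subtree of prefix p lies in [p·8^(i+1), (p+1)·8^(i+1))
theorem S_bound : ∀ (n : Nat) (i p v : Int), (i + 1).toNat ≤ n → v ∈ S i p →
    p * 8 ^ ((i + 1).toNat) ≤ v ∧ v < (p + 1) * 8 ^ ((i + 1).toNat) := by
  intro n
  induction n with
  | zero =>
      intro i p v hn hv
      have hi : i < 0 := by omega
      rw [S_neg hi] at hv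
      simp at hv
      subst hv
      have : (i + 1).toNat = 0 := by omega
      rw [this]; simp
  | succ n ih =>
      intro i p v hn hv
      by_cases hi : i < 0
      · rw [S_neg hi] at hv
        simp at hv
        subst hv
        have : (i + 1).toNat = 0 := by omega
        rw [this]; simp
      · rw [S_nonneg hi] at hv
        rw [List.mem_flatMap] at hv
        obtain ⟨q, hq, hvq⟩ := hv
        have hq' : q ∈ PySem.List.pyRange (p * 8) ((p + 1) * 8) 1 :=
          List.mem_of_mem_filter hq
        rw [PySem.List.mem_pyRange_one] at hq'
        have hIH := ih (i - 1) q v (by omega) hvq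
        have he : ((i - 1) + 1).toNat = i.toNat := by omega
        have he2 : (i + 1).toNat = i.toNat + 1 := by omega
        rw [he] at hIH
        rw [he2, pow_succ]
        have hpos : (0 : Int) < 8 ^ i.toNat := by positivity
        constructor
        · calc p * (8 ^ i.toNat * 8) = (p * 8) * 8 ^ i.toNat := by ring
            _ ≤ q * 8 ^ i.toNat := by
                apply mul_le_mul_of_nonneg_right (by omega) (le_of_lt hpos)
            _ ≤ v := hIH.1
        · calc v < (q + 1) * 8 ^ i.toNat := hIH.2
            _ ≤ ((p + 1) * 8) * 8 ^ i.toNat := by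
                apply mul_le_mul_of_nonneg_right (by omega) (le_of_lt hpos)
            _ = (p + 1) * (8 ^ i.toNat * 8) := by ring

theorem findGo_neg_or (f : Int → Int) (c : Int → Bool) :
    ∀ xs : List Int, findGo f c xs = -1 ∨ 0 ≤ findGo f c xs := by
  intro xs
  induction xs with
  | nil => left; rfl
  | cons x t ih =>
      by_cases hc : c x
      · simp only [findGo, hc, if_true]
        by_cases ha : 0 ≤ f x
        · right; simpa [ha] using ha
        · simpa [ha] using ih
      · simpa [findGo, hc] using ih

theorem pyN_of_neg_or {v : Int} (h : v = -1 ∨ 0 ≤ v) : pyN v = v := by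
  unfold pyN
  rcases h with h | h
  · subst h; norm_num
  · simp [h]

theorem foldl_min_of_le (l : List Int) : ∀ (y : Int), (∀ b ∈ l, y ≤ b) → l.foldl min y = y := by
  induction l with
  | nil => intro y _; rfl
  | cons b t ih =>
      intro y h
      have hb : y ≤ b := h b (by simp)
      simp only [List.foldl_cons, min_eq_left hb]
      exact ih y (fun c hc => h c (by simp [hc]))

theorem foldl_min_mem' (t : List Int) : ∀ (x : Int), t.foldl min x ∈ x :: t := by
  induction t with
  | nil => intro x; simp [List.foldl]
  | cons c t ih =>
      intro x
      have := ih (min x c)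
      simp only [List.foldl_cons]
      rcases List.mem_cons.mp this with h | h
      · rcases min_choice x c with hm | hm
        · rw [h, hm]; simp
        · rw [h, hm]; simp
      · simp [h]

theorem Mv_append_nil {l1 : List Int} (l2 : List Int)
    (h : l1.filter (fun v => decide (0 ≤ v)) = []) : Mv (l1 ++ l2) = Mv l2 := by
  unfold Mv
  rw [List.filter_append, h, List.nil_append]

theorem Mv_append_ne {l1 : List Int} (l2 : List Int)
    (h : ∀ a ∈ l1, ∀ b ∈ l2, a ≤ b)
    (hf : l1.filter (fun v => decide (0 ≤ v)) ≠ []) : Mv (l1 ++ l2) = Mv l1 := by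
  unfold Mv
  rw [List.filter_append]
  rcases List.exists_cons_of_ne_nil hf with ⟨x, t, hxt⟩
  rw [hxt, List.cons_append, PySem.List.min?_id_cons, PySem.List.min?_id_cons,
    List.foldl_append]
  have hy : t.foldl min x ∈ x :: t := foldl_min_mem' t x
  have hyf : List.foldl min x t ∈ List.filter (fun v => decide (0 ≤ v)) l1 := by
    rw [hxt]; exact hy
  have hy1 : t.foldl min x ∈ l1 := List.mem_of_mem_filter hyf
  have : (l2.filter (fun v => decide (0 ≤ v))).foldl min (t.foldl min x) = t.foldl min x := by
    apply foldl_min_of_le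
    intro b hb
    exact h _ hy1 b (List.mem_of_mem_filter hb)
  rw [this]

theorem Mv_nonneg_of_ne {l : List Int}
    (hf : l.filter (fun v => decide (0 ≤ v)) ≠ []) : 0 ≤ Mv l := by
  unfold Mv
  rcases List.exists_cons_of_ne_nil hf with ⟨x, t, hxt⟩
  rw [hxt, PySem.List.min?_id_cons]
  have hy : t.foldl min x ∈ x :: t := foldl_min_mem' t x
  rw [← hxt] at hy
  have := List.of_mem_filter hy
  simpa using this

theorem Mv_of_nil {l : List Int}
    (hf : l.filter (fun v => decide (0 ≤ v)) = []) : Mv l = -1 := by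
  unfold Mv
  rw [hf]
  rfl

-- DFS over a strictly increasing candidate list = min-of-survivors of its forest
theorem dfs_eq (i : Int) (hi : ¬ i < 0)
    (IH : ∀ x : Int, pyN (find (i - 1) x) = Mv (S (i - 1) x)) :
    ∀ xs : List Int, xs.Pairwise (· < ·) →
      findGo (fun a2 => find (i - 1) a2) (okA i) xs
        = Mv ((xs.filter (okA i)).flatMap (fun q => S (i - 1) q)) := by
  intro xs
  induction xs with
  | nil => intro _; simp [findGo, Mv, PySem.List.min?]
  | cons x t ih =>
      intro hp
      have hpt := List.Pairwise.of_cons hp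
      by_cases hc : okA i x
      · simp only [findGo, hc, if_true, List.filter_cons, List.flatMap_cons]
        have hord : ∀ a ∈ S (i - 1) x, ∀ b ∈ (t.filter (okA i)).flatMap (fun q => S (i - 1) q), a ≤ b := by
          intro a ha b hb
          rw [List.mem_flatMap] at hb
          obtain ⟨y, hy, hby⟩ := hb
          have hxy : x < y := by
            have := List.rel_of_pairwise_cons hp (List.mem_of_mem_filter hy)
            exact this
          have hA := S_bound ((i - 1) + 1).toNat (i - 1) x a (le_refl _) ha
          have hB := S_bound ((i - 1) + 1).toNat (i - 1) y b (le_refl _) hby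
          have hpos : (0 : Int) < 8 ^ ((i - 1) + 1).toNat := by positivity
          have : (x + 1) * 8 ^ ((i - 1) + 1).toNat ≤ y * 8 ^ ((i - 1) + 1).toNat :=
            mul_le_mul_of_nonneg_right (by omega) (le_of_lt hpos)
          refine le_of_lt ?_
          calc a < (x + 1) * 8 ^ ((i - 1) + 1).toNat := hA.2
            _ ≤ y * 8 ^ ((i - 1) + 1).toNat := this
            _ ≤ b := hB.1
        by_cases hf : (S (i - 1) x).filter (fun v => decide (0 ≤ v)) = []
        · -- subtree of x has no valid value: DFS skips x
          have hm : Mv (S (i - 1) x) = -1 := Mv_of_nil hf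
          have hN : pyN (find (i - 1) x) = -1 := by rw [IH x, hm]
          have hlt : ¬ 0 ≤ find (i - 1) x := by
            intro h0
            rw [pyN, if_pos h0] at hN
            omega
          simp only [hlt, if_false]
          rw [ih hpt, Mv_append_nil _ hf]
        · -- subtree of x has a valid value: DFS returns it
          have hm : 0 ≤ Mv (S (i - 1) x) := Mv_nonneg_of_ne hf
          have hN := IH x
          have h0 : 0 ≤ find (i - 1) x := by
            by_contra h0
            rw [pyN, if_neg h0] at hN
            omega
          have hval : find (i - 1) x = Mv (S (i - 1) x) := by
            rw [← hN, pyN, if_pos h0]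
          simp only [h0, if_true]
          rw [hval, Mv_append_ne _ hord hf]
      · simp only [findGo, hc, List.filter_cons]
        exact ih hpt

theorem find_main : ∀ (n : Nat) (i A : Int), (i + 1).toNat ≤ n →
    pyN (find i A) = Mv (S i A) := by
  intro n
  induction n with
  | zero =>
      intro i A hn
      have hi : i < 0 := by omega
      rw [find, dif_pos hi, S_neg hi]
      unfold pyN Mv
      by_cases h : 0 ≤ A
      · simp [h, PySem.List.min?_id_cons, List.filter]
      · simp [h, List.filter, PySem.List.min?]
  | succ n ih =>
      intro i A hn
      by_cases hi : i < 0
      · rw [find, dif_pos hi, S_neg hi]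
        unfold pyN Mv
        by_cases h : 0 ≤ A
        · simp [h, PySem.List.min?_id_cons, List.filter]
        · simp [h, List.filter, PySem.List.min?]
      · have hfind : find i A
            = findGo (fun a2 => find (i - 1) a2) (okA i) (PySem.List.pyRange (A * 8) ((A + 1) * 8) 1) := by
          rw [find, dif_neg hi]
        have hres := dfs_eq i hi (fun x => ih (i - 1) x (by omega))
          (PySem.List.pyRange (A * 8) ((A + 1) * 8) 1) (PySem.List.pairwise_lt_pyRange_one _ _)
        rw [hfind, pyN_of_neg_or (findGo_neg_or _ _ _), hres, S_nonneg hi]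
        rfl

theorem layers_eq : ∀ (n : Nat) (i : Int), (i + 1).toNat ≤ n → ∀ L : List Int,
    (PySem.List.pyRange i (-1) (-1)).foldl (fun cs level => cs.flatMap (expand level)) L
      = L.flatMap (fun p => S i p) := by
  intro n
  induction n with
  | zero =>
      intro i hn L
      have hi : i ≤ -1 := by omega
      rw [PySem.List.pyRange_neg_one_eq_nil hi]
      simp only [List.foldl_nil]
      have : ∀ p : Int, S i p = [p] := fun p => S_neg (by omega) p
      simp [this]
  | succ n ih =>
      intro i hn L
      by_cases hi : i < 0
      · rw [PySem.List.pyRange_neg_one_eq_nil (by omega)]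
        simp only [List.foldl_nil]
        have : ∀ p : Int, S i p = [p] := fun p => S_neg hi p
        simp [this]
      · rw [PySem.List.pyRange_neg_one_cons (by omega : (-1 : Int) < i)]
        simp only [List.foldl_cons]
        rw [ih (i - 1) (by omega) (L.flatMap (expand i))]
        rw [List.flatMap_assoc]
        apply List.flatMap_congr
        intro p _
        exact (S_nonneg hi p).symm

theorem find_alt_eq {i : Int} (hi : ¬ i < 0) (A : Int) : find_alt i A = Mv (S i A) := by
  rw [find_alt, if_neg hi]
  rw [layers_eq ((i + 1).toNat) i (le_refl _) [A]]
  simp only [List.flatMap_cons, List.flatMap_nil, List.append_nil]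
  rfl

-- ===== VERDICT (by name: the statement is the Claim_ definition above) =====
theorem find_spec : Claim_equal_find := by
  unfold Claim_equal_find Spec_find
  intro i A _hD _hP
  by_cases hi : i < 0
  · rw [find, dif_pos hi, find_alt, if_pos hi]
  · rw [find_alt_eq hi]
    rw [← find_main ((i + 1).toNat) i A (le_refl _)]
    have : find i A
        = findGo (fun a2 => find (i - 1) a2) (okA i) (PySem.List.pyRange (A * 8) ((A + 1) * 8) 1) := by
      rw [find, dif_neg hi]
    rw [this, pyN_of_neg_or (findGo_neg_or _ _ _)]
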